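-- pv_equiv track=rewrite | github.com/abdul-rasool/EDS-Effective-DNA-Storage-System | EDS.py | index_encode
-- ===== SOURCE A (Python) =====
-- def dec_to_ter(num):
--     l = []
--     if num < 0:
--         return "- " + dec_to_ter(abs(num))
--     else:
--         while True:
--             num, reminder = divmod(num, 3)
--             l.append(reminder)
--             if num == 0:
--                 return l[::-1]
--
-- def index_encode(index, index_length):
--     pre = 'A'
--     index_result = ""
--     base_rule = {'A':['C','G','T'],'T':['A','C','G'],'C':['G','T','A'],'G':['T','A','C']}
--     ter_index = list(map(int, list("".join(list(map(str, dec_to_ter(index)))).zfill(index_length))))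
--     for num in ter_index:
--         base = base_rule[pre][num]
--         index_result += base
--         pre = base
--     return index_result
-- ===== SOURCE B (Python) =====
-- def index_encode(index, index_length):
--     # ternary digits, most significant first, by recursion
--     def digits(n):
--         return (digits(n // 3) if n >= 3 else []) + [n % 3]
--     ds = digits(index)
--     ds = [0] * max(0, index_length - len(ds)) + ds
--     # running prefix sums of the digits
--     pref = []
--     s = 0
--     for d in ds:
--         s += d
--         pref.append(s)
--     # closed form: the i-th output base is 'ACGT'[(i + 1 + sum(ds[:i+1])) % 4]
--     return "".join("ACGT"[(i + 1 + s) % 4] for i, s in enumerate(pref))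
-- ===== Notes on version B (the rewrite author's own statement) =====
-- stated objective: alternative
-- what changed: B removes A's dict-table state machine and the digits->str->join->zfill->map(int) round-trip: it extracts ternary digits by recursion (MSB-first), pads at the list level, computes prefix sums in one pass, and emits each base by the closed form 'ACGT'[(i+1+prefixsum) % 4] instead of threading the previous base through a transition table.
import Mathlib
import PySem

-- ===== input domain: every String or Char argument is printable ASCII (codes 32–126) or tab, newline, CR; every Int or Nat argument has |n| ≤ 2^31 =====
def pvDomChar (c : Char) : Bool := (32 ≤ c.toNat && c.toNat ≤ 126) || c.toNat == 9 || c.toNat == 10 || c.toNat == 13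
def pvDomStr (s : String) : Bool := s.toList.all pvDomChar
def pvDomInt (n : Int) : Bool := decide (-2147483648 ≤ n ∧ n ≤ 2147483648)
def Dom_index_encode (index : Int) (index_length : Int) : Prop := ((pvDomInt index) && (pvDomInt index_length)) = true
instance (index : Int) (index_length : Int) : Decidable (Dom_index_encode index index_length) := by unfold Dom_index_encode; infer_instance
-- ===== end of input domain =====

-- B drops A's stateful table-driven pass entirely: it extracts ternary digits recursively
-- (most-significant first), pads at the list level, takes one prefix-sum pass, and emits each
-- base by the closed form 'ACGT'[(i+1+prefixsum_i) % 4] (objective: alternative).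

-- ===== PORT A =====
-- helper dec_to_ter: the 'while True' loop, fuel num.toNat+1 is always enough (quotient decreases)
def decToTerLoop (num : Int) (l : List Int) : Nat → List Int
  | 0 => l.reverse
  | fuel+1 =>
    let q := PySem.Int.floordiv num 3
    let r := PySem.Int.mod num 3
    if q = 0 then (l ++ [r]).reverse
    else decToTerLoop q (l ++ [r]) fuel

-- dec_to_ter; for num < 0 the Python raises TypeError ("- " + list), excluded by Pre_
def decToTer (num : Int) : List Int :=
  if num < 0 then [] else decToTerLoop num [] (num.toNat + 1)

def baseRule : PySem.Dict Char (List Char) :=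
  PySem.Dict.ofList [('A', ['C','G','T']), ('T', ['A','C','G']), ('C', ['G','T','A']), ('G', ['T','A','C'])]

-- one iteration of A's for-loop; lookups total because pre ∈ "ACGT" and num ∈ {0,1,2} under Pre_
def stepA (st : Char × List Char) (num : Int) : Char × List Char :=
  let base := (PySem.List.pyGet? (PySem.Dict.getD baseRule st.1 []) num).getD 'A'
  (base, st.2 ++ [base])

def index_encode (index : Int) (index_length : Int) : String :=
  let terIndex : List Int :=
    (PySem.Chars.zfill (PySem.Chars.join [] ((decToTer index).map PySem.Int.toChars)) index_length).map
      (fun c => (PySem.Int.ofChars? [c]).getD 0)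
  String.ofList (terIndex.foldl stepA ('A', [])).2

-- ===== PORT B =====
-- Source B's recursive helper digits(n); fuel n.toNat+1 always suffices (n//3 decreases)
def digitsB (fuel : Nat) (n : Int) : List Int :=
  match fuel with
  | 0 => [PySem.Int.mod n 3]
  | fuel+1 =>
    (if n ≥ 3 then digitsB fuel (PySem.Int.floordiv n 3) else []) ++ [PySem.Int.mod n 3]

-- Source B's prefix-sum loop body: s += d; pref.append(s)
def prefStep (st : Int × List Int) (d : Int) : Int × List Int :=
  (st.1 + d, st.2 ++ [st.1 + d])

def index_encode_alt (index : Int) (index_length : Int) : String :=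
  let ds0 := digitsB (index.toNat + 1) index
  let ds := List.replicate (max 0 (index_length - (ds0.length : Int))).toNat 0 ++ ds0
  let pref := (ds.foldl prefStep (0, [])).2
  String.ofList ((PySem.List.enumerate pref 0).map
    (fun p => (PySem.List.pyGet? "ACGT".toList (PySem.Int.mod (p.1 + 1 + p.2) 4)).getD 'A'))

-- ===== PRECONDITION & SPEC =====
-- A raises TypeError for index < 0 (dec_to_ter's "- " + list); excluded.
def Pre_index_encode (index : Int) (index_length : Int) : Prop := 0 ≤ index
instance (index : Int) (index_length : Int) : Decidable (Pre_index_encode index index_length) := by unfold Pre_index_encode; infer_instance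
def pvWitness_index_encode : Int × Int := (25, 6)

def Spec_index_encode (index : Int) (index_length : Int) (out : String) : Prop := out = index_encode_alt index index_length
instance (index : Int) (index_length : Int) (out : String) : Decidable (Spec_index_encode index index_length out) := by unfold Spec_index_encode; infer_instance

-- ===== CLAIM (what is proved, stated in full; the proofs are below) =====
def Claim_equal_index_encode : Prop := ∀ (index : Int) (index_length : Int), Dom_index_encode index index_length → Pre_index_encode index index_length → Spec_index_encode index index_length (index_encode index index_length)

-- ===== LEMMAS AND PROOFS =====

-- A's loop equals B's recursion: LSB-first appends + final reverse = MSB-first recursion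
lemma loop_eq_digitsB : ∀ (fuel : Nat) (num : Int) (l : List Int), 0 ≤ num → num.toNat < fuel →
    decToTerLoop num l fuel = digitsB fuel num ++ l.reverse := by
  intro fuel
  induction fuel with
  | zero => intro num l h hf; omega
  | succ fuel ih =>
    intro num l h hf
    simp only [decToTerLoop, digitsB]
    have h3 : PySem.Int.floordiv num 3 = num / 3 := PySem.Int.floordiv_eq_ediv_of_pos (by norm_num)
    by_cases hq : num / 3 = 0
    · have hlt3 : ¬ num ≥ 3 := by omega
      simp [hq, hlt3]
    · have hge : num ≥ 3 := by omega
      rw [if_neg (by simp [hq]),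
        ih _ _ (by omega) (by rw [h3]; omega)]
      simp [hge]

lemma decToTer_eq_digitsB (num : Int) (h : 0 ≤ num) :
    decToTer num = digitsB (num.toNat + 1) num := by
  unfold decToTer
  rw [if_neg (by omega), loop_eq_digitsB _ _ _ h (by omega)]
  simp

-- every digit produced by dec_to_ter is in {0,1,2}
lemma decToTerLoop_mem (fuel : Nat) : ∀ (num : Int) (l : List Int),
    (∀ d ∈ l, 0 ≤ d ∧ d < 3) → ∀ d ∈ decToTerLoop num l fuel, 0 ≤ d ∧ d < 3 := by
  induction fuel with
  | zero => intro num l hl d hd; exact hl d (List.mem_reverse.mp hd)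
  | succ fuel ih =>
    intro num l hl d hd
    simp only [decToTerLoop] at hd
    have hr : 0 ≤ PySem.Int.mod num 3 ∧ PySem.Int.mod num 3 < 3 :=
      ⟨PySem.Int.mod_nonneg num (by norm_num), PySem.Int.mod_lt num (by norm_num)⟩
    have hl' : ∀ d ∈ l ++ [PySem.Int.mod num 3], 0 ≤ d ∧ d < 3 := by
      intro d hd
      rcases List.mem_append.mp hd with h | h
      · exact hl d h
      · simpa using (List.mem_singleton.mp h) ▸ hr
    split at hd
    · exact hl' d (List.mem_reverse.mp hd)
    · exact ih _ _ hl' d hd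

lemma decToTer_mem (num : Int) : ∀ d ∈ decToTer num, 0 ≤ d ∧ d < 3 := by
  intro d hd
  unfold decToTer at hd
  split at hd
  · simp at hd
  · exact decToTerLoop_mem _ _ _ (by simp) d hd

-- zfill on a digit string is list-level left padding
lemma zfill_digits (cs : List Char) (w : Int)
    (h : ∀ c ∈ cs, c = '0' ∨ c = '1' ∨ c = '2') :
    PySem.Chars.zfill cs w = List.replicate (w.toNat - cs.length) '0' ++ cs := by
  unfold PySem.Chars.zfill
  split
  · have : w.toNat - cs.length = 0 := by omega
    simp [this]
  · match cs, h with
    | [], _ => simp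
    | c :: rest, h =>
      have hc := h c (by simp)
      have : ¬ (c = '+' ∨ c = '-') := by rcases hc with h|h|h <;> simp [h]
      simp [this]

-- the char a digit d ∈ {0,1,2} prints as
def digitChar (d : Int) : Char := if d = 0 then '0' else if d = 1 then '1' else '2'

lemma toChars_digit (d : Int) (h : 0 ≤ d ∧ d < 3) : PySem.Int.toChars d = [digitChar d] := by
  have : d = 0 ∨ d = 1 ∨ d = 2 := by omega
  rcases this with h|h|h <;> subst h <;> decide

lemma ofChars_digit (d : Int) (h : 0 ≤ d ∧ d < 3) :
    (PySem.Int.ofChars? [digitChar d]).getD 0 = d := by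
  have : d = 0 ∨ d = 1 ∨ d = 2 := by omega
  rcases this with h|h|h <;> subst h <;> decide

-- A's ter_index equals a replicate-padded digit list
lemma terIndex_eq (ds : List Int) (w : Int) (h : ∀ d ∈ ds, 0 ≤ d ∧ d < 3) :
    (PySem.Chars.zfill (PySem.Chars.join [] (ds.map PySem.Int.toChars)) w).map
      (fun c => (PySem.Int.ofChars? [c]).getD 0)
    = List.replicate (w.toNat - ds.length) 0 ++ ds := by
  have hmap : ds.map PySem.Int.toChars = (ds.map digitChar).map (fun c => [c]) := by
    simp only [List.map_map]
    exact List.map_congr_left (fun d hd => toChars_digit d (h d hd))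
  rw [hmap, PySem.Chars.join_nil_singletons,
      zfill_digits _ _ (by
        intro c hc
        rcases List.mem_map.mp hc with ⟨d, hd, rfl⟩
        have := h d hd
        have : d = 0 ∨ d = 1 ∨ d = 2 := by omega
        rcases this with h|h|h <;> subst h <;> simp [digitChar])]
  rw [List.map_append, List.map_replicate, List.map_map, List.length_map,
      show (PySem.Int.ofChars? ['0']).getD 0 = (0 : Int) from by decide]
  congr 1
  have hid : ∀ d ∈ ds, ((fun c => (PySem.Int.ofChars? [c]).getD 0) ∘ digitChar) d = id d :=
    fun d hd => ofChars_digit d (h d hd)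
  rw [List.map_congr_left hid, List.map_id]

-- B's padding width equals A's zfill padding width
lemma pad_width_eq (len : Nat) (w : Int) :
    (max 0 (w - (len : Int))).toNat = w.toNat - len := by
  rcases le_total (w - (len : Int)) 0 with h | h
  · rw [max_eq_left h]; omega
  · rw [max_eq_right h]; omega

-- the prefix sums of ds starting from accumulated sum s
def prefList (s : Int) : List Int → List Int
  | [] => []
  | d :: ds => (s + d) :: prefList (s + d) ds

lemma pref_fold (ds : List Int) : ∀ (s : Int) (acc : List Int),
    (ds.foldl prefStep (s, acc)).2 = acc ++ prefList s ds := by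
  induction ds with
  | nil => intro s acc; simp [prefList]
  | cons d ds ih =>
    intro s acc
    simp only [List.foldl_cons, prefStep, prefList, ih]
    simp

-- the character B emits for running value run ∈ [0,4)
def chrOf (run : Int) : Char := (PySem.List.pyGet? "ACGT".toList run).getD 'A'

-- A's table lookup at chrOf run emits chrOf((run+d+1) % 4)
lemma step_agree (run d : Int) (hr : 0 ≤ run ∧ run < 4) (hd : 0 ≤ d ∧ d < 3) :
    (PySem.List.pyGet? (PySem.Dict.getD baseRule (chrOf run) []) d).getD 'A'
      = chrOf (PySem.Int.mod (run + d + 1) 4) := by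
  have h1 : run = 0 ∨ run = 1 ∨ run = 2 ∨ run = 3 := by omega
  have h2 : d = 0 ∨ d = 1 ∨ d = 2 := by omega
  rcases h1 with h|h|h|h <;> subst h <;> rcases h2 with h|h|h <;> subst h <;> decide

-- A's stateful fold expands to B's closed form over the enumerated prefix sums
lemma fold_closed_form (ds : List Int) (h : ∀ d ∈ ds, 0 ≤ d ∧ d < 3) :
    ∀ (i0 s : Int) (acc : List Char),
    (ds.foldl stepA (chrOf (PySem.Int.mod (i0 + s) 4), acc)).2
      = acc ++ (PySem.List.enumerate (prefList s ds) i0).map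
          (fun p => (PySem.List.pyGet? "ACGT".toList (PySem.Int.mod (p.1 + 1 + p.2) 4)).getD 'A') := by
  induction ds with
  | nil => intro i0 s acc; simp [prefList, PySem.List.enumerate_nil]
  | cons d ds ih =>
    intro i0 s acc
    have hd := h d (by simp)
    have hmem : ∀ x ∈ ds, 0 ≤ x ∧ x < 3 := fun x hx => h x (by simp [hx])
    have hr : 0 ≤ PySem.Int.mod (i0 + s) 4 ∧ PySem.Int.mod (i0 + s) 4 < 4 :=
      ⟨PySem.Int.mod_nonneg _ (by norm_num), PySem.Int.mod_lt _ (by norm_num)⟩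
    have hm4 : ∀ a : Int, PySem.Int.mod a 4 = a % 4 :=
      fun a => PySem.Int.mod_eq_emod_of_pos (by norm_num)
    have hkey : PySem.Int.mod (PySem.Int.mod (i0 + s) 4 + d + 1) 4
        = PySem.Int.mod (i0 + 1 + (s + d)) 4 := by
      rw [hm4, hm4, hm4]; omega
    simp only [List.foldl_cons, stepA, step_agree _ d hr hd, hkey, prefList,
      PySem.List.enumerate_cons, List.map_cons]
    rw [ih hmem (i0 + 1) (s + d) (acc ++ [chrOf (PySem.Int.mod (i0 + 1 + (s + d)) 4)])]
    simp [chrOf]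

-- ===== VERDICT (by name: the statement is the Claim_ definition above) =====
theorem index_encode_spec : Claim_equal_index_encode := by
  intro index index_length _ hpre
  unfold Spec_index_encode index_encode index_encode_alt
  dsimp only
  rw [terIndex_eq _ _ (decToTer_mem index), ← decToTer_eq_digitsB index hpre,
      pad_width_eq, pref_fold]
  have hpadmem : ∀ d ∈ List.replicate (index_length.toNat - (decToTer index).length) 0 ++ decToTer index, 0 ≤ d ∧ d < 3 := by
    intro d hd
    rcases List.mem_append.mp hd with h | h
    · have := List.mem_replicate.mp h; omega
    · exact decToTer_mem index d h
  have hA := fold_closed_form _ hpadmem 0 0 []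
  rw [show chrOf (PySem.Int.mod (0 + 0) 4) = 'A' from by decide] at hA
  simp only [List.nil_append] at hA ⊢
  rw [hA]
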